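-- pv_equiv track=rewrite | github.com/KarstenPoddig/django_movie_project | movie_app/sql_query/sql_query.py | get_year_filter_str
-- ===== SOURCE A (Python) =====
-- def get_year_filter_str(filter_year):
--     if filter_year == '':
--         return ''
--     years_list = list()
--     years = filter_year.split(',')
--     if '1950s and earlier' in years:
--         years_list += list(range(1874, 1960))
--     if '1960s' in years:
--         years_list += list(range(1960, 1970))
--     if '1970s' in years:
--         years_list += list(range(1970, 1980))
--     if '1980s' in years:
--         years_list += list(range(1980, 1990))
--     if '1990s' in years:
--         years_list += list(range(1990, 2000))
--     if '2000s' in years: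
--         years_list += list(range(2000, 2010))
--     if '2010s' in years:
--         years_list += list(range(2010, 2020))
--     return ','.join(str(year) for year in years_list)
-- ===== SOURCE B (Python) =====
-- def _decade_label(year):
--     if year < 1960:
--         return '1950s and earlier'
--     return str(year // 10 * 10) + 's'
--
-- def get_year_filter_str(filter_year):
--     if filter_year == '':
--         return ''
--     selected = set(filter_year.split(','))
--     return ','.join(str(year) for year in range(1874, 2020)
--                     if _decade_label(year) in selected)
-- ===== Notes on version B (the rewrite author's own statement) =====
-- stated objective: simpler
-- what changed: Inverts the traversal: instead of expanding a year range for each of seven hard-coded label branches, B scans the candidate years 1874..2019 once and keeps each year whose computed decade label (decade start from floor division, with a before-1960 catch-all) is in the set of selected labels.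
import Mathlib
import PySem

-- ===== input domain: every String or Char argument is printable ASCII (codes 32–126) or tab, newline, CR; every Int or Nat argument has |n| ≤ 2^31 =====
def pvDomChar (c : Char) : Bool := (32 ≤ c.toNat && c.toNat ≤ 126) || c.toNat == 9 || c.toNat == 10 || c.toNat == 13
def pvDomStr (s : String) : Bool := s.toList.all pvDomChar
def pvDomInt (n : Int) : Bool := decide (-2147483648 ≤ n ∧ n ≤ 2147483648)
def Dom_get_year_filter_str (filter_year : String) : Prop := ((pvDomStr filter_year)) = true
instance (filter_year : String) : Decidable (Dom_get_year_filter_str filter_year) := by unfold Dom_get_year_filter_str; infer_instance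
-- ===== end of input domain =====

-- B inverts the traversal: instead of seven label-indexed range expansions it scans the
-- years 1874..2019 once, keeping each year whose computed decade label is a selected label
-- (objective: simpler). Same return value on every input.

-- ===== PORT A =====
def get_year_filter_str (filter_year : String) : String :=
  if filter_year = "" then "" else
    let years_list : List Int := []
    let years := (PySem.Str.split? filter_year ",").getD []  -- sep "," is non-empty, so split? is always some (exact)
    let years_list := if years.contains "1950s and earlier" then years_list ++ PySem.List.pyRange 1874 1960 1 else years_list
    let years_list := if years.contains "1960s" then years_list ++ PySem.List.pyRange 1960 1970 1 else years_list
    let years_list := if years.contains "1970s" then years_list ++ PySem.List.pyRange 1970 1980 1 else years_list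
    let years_list := if years.contains "1980s" then years_list ++ PySem.List.pyRange 1980 1990 1 else years_list
    let years_list := if years.contains "1990s" then years_list ++ PySem.List.pyRange 1990 2000 1 else years_list
    let years_list := if years.contains "2000s" then years_list ++ PySem.List.pyRange 2000 2010 1 else years_list
    let years_list := if years.contains "2010s" then years_list ++ PySem.List.pyRange 2010 2020 1 else years_list
    PySem.Str.join "," (years_list.map PySem.Int.toStr)

-- ===== PORT B =====
def pvDecadeLabel (year : Int) : String :=
  if year < 1960 then "1950s and earlier"
  else String.ofList (PySem.Int.toChars (PySem.Int.floordiv year 10 * 10) ++ ['s'])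
  -- str(year//10*10) + 's' ported on the char-list level (exact: str(int) is ASCII)

def get_year_filter_str_alt (filter_year : String) : String :=
  if filter_year = "" then "" else
    let selected : PySem.Set String := PySem.Set.ofList ((PySem.Str.split? filter_year ",").getD [])
    PySem.Str.join ","
      (((PySem.List.pyRange 1874 2020 1).filter
          (fun year => PySem.Set.contains selected (pvDecadeLabel year))).map PySem.Int.toStr)

-- ===== PRECONDITION & SPEC =====
def Spec_get_year_filter_str (filter_year : String) (out : String) : Prop := out = get_year_filter_str_alt filter_year
instance (filter_year : String) (out : String) : Decidable (Spec_get_year_filter_str filter_year out) := by unfold Spec_get_year_filter_str; infer_instance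

-- ===== CLAIM =====
def Claim_equal_get_year_filter_str : Prop := ∀ (filter_year : String), Dom_get_year_filter_str filter_year → Spec_get_year_filter_str filter_year (get_year_filter_str filter_year)

-- ===== LEMMAS AND PROOFS =====

-- (if c then x ++ r else x) pushes the branch to the right of the accumulator
theorem pv_if_append {α : Type} (c : Bool) (x r : List α) :
    (if c then x ++ r else x) = x ++ (if c then r else []) := by
  cases c <;> simp

-- membership in set(ys) is membership in ys, as Bool
theorem pv_set_contains (ys : List String) (L : String) :
    PySem.Set.contains (PySem.Set.ofList ys) L = ys.contains L := by
  cases h : ys.contains L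
  · simp only [PySem.Set.contains_eq_listContains]
    simp_all [PySem.Set.mem_ofList]
  · simp only [PySem.Set.contains_eq_listContains]
    simp_all [PySem.Set.mem_ofList]

-- a range segment on which the label is constantly L filters to all-or-nothing
theorem pv_seg (ys : List String) (a b : Int) (L : String)
    (hlab : ∀ y ∈ PySem.List.pyRange a b 1, pvDecadeLabel y = L) :
    (PySem.List.pyRange a b 1).filter
        (fun y => PySem.Set.contains (PySem.Set.ofList ys) (pvDecadeLabel y))
      = if ys.contains L then PySem.List.pyRange a b 1 else [] := by
  have h1 : (PySem.List.pyRange a b 1).filter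
        (fun y => PySem.Set.contains (PySem.Set.ofList ys) (pvDecadeLabel y))
      = (PySem.List.pyRange a b 1).filter (fun _ => ys.contains L) := by
    apply List.filter_congr
    intro y hy
    rw [hlab y hy, pv_set_contains]
  rw [h1]
  cases h : ys.contains L <;> simp

-- ===== VERDICT =====
theorem get_year_filter_str_spec : Claim_equal_get_year_filter_str := by
  intro s _
  unfold Spec_get_year_filter_str get_year_filter_str get_year_filter_str_alt
  by_cases h : s = ""
  · simp only [if_pos h]
  · simp only [if_neg h]
    congr 1
    congr 1
    set ys := (PySem.Str.split? s ",").getD [] with hys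
    have hsplit : PySem.List.pyRange (1874:Int) 2020 1
        = PySem.List.pyRange 1874 1960 1 ++ PySem.List.pyRange 1960 1970 1
          ++ PySem.List.pyRange 1970 1980 1 ++ PySem.List.pyRange 1980 1990 1
          ++ PySem.List.pyRange 1990 2000 1 ++ PySem.List.pyRange 2000 2010 1
          ++ PySem.List.pyRange 2010 2020 1 := by decide
    rw [hsplit]
    simp only [List.filter_append]
    rw [pv_seg ys 1874 1960 "1950s and earlier" (by decide),
        pv_seg ys 1960 1970 "1960s" (by decide),
        pv_seg ys 1970 1980 "1970s" (by decide),
        pv_seg ys 1980 1990 "1980s" (by decide),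
        pv_seg ys 1990 2000 "1990s" (by decide),
        pv_seg ys 2000 2010 "2000s" (by decide),
        pv_seg ys 2010 2020 "2010s" (by decide)]
    simp only [pv_if_append, List.nil_append, List.append_assoc]
    split_ifs <;> simp
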